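-- pv_equiv track=rewrite | github.com/mischegoss/qloo | backend/multi_tool_agent/agents/information_consolidator_agent.py | _extract_negative_patterns
-- ===== SOURCE A (Python) =====
-- from typing import Dict, Any, Optional, List
--
-- def _extract_negative_patterns(negative_feedback: List[Dict[str, Any]]) -> Dict[str, Any]:
--     """Extract patterns from unsuccessful suggestions (not blocked)."""
--     patterns = {
--         "timing_issues": [],
--         "complexity_issues": [],
--         "sensory_issues": [],
--         "cultural_mismatches": []
--     }
--
--     for feedback in negative_feedback:
--         feedback_reason = feedback.get("reason", "")
--
--         if "time" in feedback_reason.lower() or "timing" in feedback_reason.lower():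
--             patterns["timing_issues"].append(feedback.get("context", ""))
--         elif "complex" in feedback_reason.lower() or "difficult" in feedback_reason.lower():
--             patterns["complexity_issues"].append(feedback.get("context", ""))
--         elif any(sense in feedback_reason.lower() for sense in ["loud", "bright", "overwhelming"]):
--             patterns["sensory_issues"].append(feedback.get("context", ""))
--         elif "cultural" in feedback_reason.lower() or "not their style" in feedback_reason.lower():
--             patterns["cultural_mismatches"].append(feedback.get("context", ""))
--
--     return patterns
-- ===== SOURCE B (Python) =====
-- from typing import Dict, Any, List
--
-- _RULES = [
--     ("timing_issues", ["time", "timing"]),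
--     ("complexity_issues", ["complex", "difficult"]),
--     ("sensory_issues", ["loud", "bright", "overwhelming"]),
--     ("cultural_mismatches", ["cultural", "not their style"]),
-- ]
--
-- def _classify(reason_lower: str):
--     """Name of the first bucket one of whose keywords occurs in the reason, else None."""
--     return next((name for name, kws in _RULES
--                  if any(k in reason_lower for k in kws)), None)
--
-- def _extract_negative_patterns(negative_feedback: List[Dict[str, Any]]) -> Dict[str, Any]:
--     """Extract patterns from unsuccessful suggestions (not blocked)."""
--     return {name: [fb.get("context", "") for fb in negative_feedback
--                    if _classify(fb.get("reason", "").lower()) == name]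
--             for name, _ in _RULES}
-- ===== Notes on version B (the rewrite author's own statement) =====
-- stated objective: simpler
-- what changed: Replaces the single loop with an if/elif branch ladder mutating a dict by a declarative keyword-rules table: a classify helper picks the first matching bucket and the result is built as one per-bucket dict comprehension.
import Mathlib
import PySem

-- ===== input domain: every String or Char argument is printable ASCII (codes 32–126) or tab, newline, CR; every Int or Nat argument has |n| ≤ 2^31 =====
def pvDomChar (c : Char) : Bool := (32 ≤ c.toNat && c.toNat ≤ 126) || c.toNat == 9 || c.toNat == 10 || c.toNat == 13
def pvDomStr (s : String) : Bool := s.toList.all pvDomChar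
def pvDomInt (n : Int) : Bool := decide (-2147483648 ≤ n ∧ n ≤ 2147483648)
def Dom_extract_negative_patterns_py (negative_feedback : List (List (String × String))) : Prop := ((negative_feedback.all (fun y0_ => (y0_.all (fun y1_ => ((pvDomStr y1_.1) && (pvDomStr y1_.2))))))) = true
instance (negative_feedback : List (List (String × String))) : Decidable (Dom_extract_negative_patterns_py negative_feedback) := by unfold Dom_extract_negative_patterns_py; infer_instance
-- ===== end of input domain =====

-- B replaces A's if/elif ladder mutating a dict by a keyword-rules table with a
-- first-match classify helper and one per-bucket comprehension (objective: simpler).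

-- fb.get(k, dflt) on the association-list dict (first match)
def pvGetD (d : List (String × String)) (k dflt : String) : String :=
  match d.find? (fun p => p.1 == k) with
  | some p => p.2
  | none => dflt

-- ===== PORT A =====
def pvStepA (d : PySem.Dict String (List String)) (fb : List (String × String)) :
    PySem.Dict String (List String) :=
  let feedback_reason := pvGetD fb "reason" ""
  if PySem.Str.isIn "time" (PySem.Str.lower feedback_reason)
      || PySem.Str.isIn "timing" (PySem.Str.lower feedback_reason) then
    d.modify "timing_issues" [] (fun xs => xs ++ [pvGetD fb "context" ""])
  else if PySem.Str.isIn "complex" (PySem.Str.lower feedback_reason)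
      || PySem.Str.isIn "difficult" (PySem.Str.lower feedback_reason) then
    d.modify "complexity_issues" [] (fun xs => xs ++ [pvGetD fb "context" ""])
  else if ["loud", "bright", "overwhelming"].any
      (fun sense => PySem.Str.isIn sense (PySem.Str.lower feedback_reason)) then
    d.modify "sensory_issues" [] (fun xs => xs ++ [pvGetD fb "context" ""])
  else if PySem.Str.isIn "cultural" (PySem.Str.lower feedback_reason)
      || PySem.Str.isIn "not their style" (PySem.Str.lower feedback_reason) then
    d.modify "cultural_mismatches" [] (fun xs => xs ++ [pvGetD fb "context" ""])
  else d

def extract_negative_patterns_py (negative_feedback : List (List (String × String))) :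
    List (String × List String) :=
  (negative_feedback.foldl pvStepA
    (PySem.Dict.ofList [("timing_issues", []), ("complexity_issues", []),
                        ("sensory_issues", []), ("cultural_mismatches", [])])).items

-- ===== PORT B =====
def pvRules : List (String × List String) :=
  [("timing_issues", ["time", "timing"]),
   ("complexity_issues", ["complex", "difficult"]),
   ("sensory_issues", ["loud", "bright", "overwhelming"]),
   ("cultural_mismatches", ["cultural", "not their style"])]

def pvClassify (reason_lower : String) : Option String :=
  (pvRules.find? (fun rule => rule.2.any (fun k => PySem.Str.isIn k reason_lower))).map (·.1)

def extract_negative_patterns_py_alt (negative_feedback : List (List (String × String))) :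
    List (String × List String) :=
  pvRules.map (fun rule =>
    (rule.1,
     (negative_feedback.filter
        (fun fb => pvClassify (PySem.Str.lower (pvGetD fb "reason" "")) == some rule.1)).map
       (fun fb => pvGetD fb "context" "")))

-- ===== PRECONDITION & SPEC =====
def Spec_extract_negative_patterns_py (negative_feedback : List (List (String × String))) (out : List (String × List String)) : Prop := out = extract_negative_patterns_py_alt negative_feedback
instance (negative_feedback : List (List (String × String))) (out : List (String × List String)) : Decidable (Spec_extract_negative_patterns_py negative_feedback out) := by unfold Spec_extract_negative_patterns_py; infer_instance

-- ===== CLAIM (what is proved, stated in full; the proofs are below) =====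
def Claim_equal_extract_negative_patterns_py : Prop := ∀ (negative_feedback : List (List (String × String))), Dom_extract_negative_patterns_py negative_feedback → Spec_extract_negative_patterns_py negative_feedback (extract_negative_patterns_py negative_feedback)

-- ===== LEMMAS AND PROOFS =====

-- B's per-bucket list, abbreviated
def pvBucket (negative_feedback : List (List (String × String))) (name : String) : List String :=
  (negative_feedback.filter
     (fun fb => pvClassify (PySem.Str.lower (pvGetD fb "reason" "")) == some name)).map
    (fun fb => pvGetD fb "context" "")

-- loop invariant: A's fold over any 4-key state appends exactly B's buckets
theorem pvMain (nf : List (List (String × String))) (t c s m : List String) :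
    (nf.foldl pvStepA
      (PySem.Dict.mk [("timing_issues", t), ("complexity_issues", c),
                      ("sensory_issues", s), ("cultural_mismatches", m)])).items
    = [("timing_issues", t ++ pvBucket nf "timing_issues"),
       ("complexity_issues", c ++ pvBucket nf "complexity_issues"),
       ("sensory_issues", s ++ pvBucket nf "sensory_issues"),
       ("cultural_mismatches", m ++ pvBucket nf "cultural_mismatches")] := by
  induction nf generalizing t c s m with
  | nil => simp [pvBucket]
  | cons fb rest ih =>
    simp only [List.foldl_cons, pvStepA]
    by_cases h1 : (PySem.Str.isIn "time" (PySem.Str.lower (pvGetD fb "reason" ""))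
        || PySem.Str.isIn "timing" (PySem.Str.lower (pvGetD fb "reason" ""))) = true
    · rw [if_pos h1]
      have hc : pvClassify (PySem.Str.lower (pvGetD fb "reason" "")) = some "timing_issues" := by
        simp only [pvClassify, pvRules]
        rw [List.find?_cons_of_pos (by simpa using h1)]
        rfl
      simp [PySem.Dict.modify, PySem.Dict.insert, PySem.Dict.getD, PySem.Dict.get?,
        PySem.Dict.contains, List.find?, ih, pvBucket, hc]
    · rw [if_neg h1]
      by_cases h2 : (PySem.Str.isIn "complex" (PySem.Str.lower (pvGetD fb "reason" ""))
          || PySem.Str.isIn "difficult" (PySem.Str.lower (pvGetD fb "reason" ""))) = true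
      · rw [if_pos h2]
        have hc : pvClassify (PySem.Str.lower (pvGetD fb "reason" "")) = some "complexity_issues" := by
          simp only [pvClassify, pvRules]
          rw [List.find?_cons_of_neg (by simpa using h1),
              List.find?_cons_of_pos (by simpa using h2)]
          rfl
        simp [PySem.Dict.modify, PySem.Dict.insert, PySem.Dict.getD, PySem.Dict.get?,
          PySem.Dict.contains, List.find?, ih, pvBucket, hc]
      · rw [if_neg h2]
        by_cases h3 : (["loud", "bright", "overwhelming"].any
            (fun sense => PySem.Str.isIn sense (PySem.Str.lower (pvGetD fb "reason" "")))) = true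
        · rw [if_pos h3]
          have hc : pvClassify (PySem.Str.lower (pvGetD fb "reason" "")) = some "sensory_issues" := by
            simp only [pvClassify, pvRules]
            rw [List.find?_cons_of_neg (by simpa using h1),
                List.find?_cons_of_neg (by simpa using h2),
                List.find?_cons_of_pos (by simpa using h3)]
            rfl
          simp [PySem.Dict.modify, PySem.Dict.insert, PySem.Dict.getD, PySem.Dict.get?,
            PySem.Dict.contains, List.find?, ih, pvBucket, hc]
        · rw [if_neg h3]
          by_cases h4 : (PySem.Str.isIn "cultural" (PySem.Str.lower (pvGetD fb "reason" ""))
              || PySem.Str.isIn "not their style" (PySem.Str.lower (pvGetD fb "reason" ""))) = true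
          · rw [if_pos h4]
            have hc : pvClassify (PySem.Str.lower (pvGetD fb "reason" ""))
                = some "cultural_mismatches" := by
              simp only [pvClassify, pvRules]
              rw [List.find?_cons_of_neg (by simpa using h1),
                  List.find?_cons_of_neg (by simpa using h2),
                  List.find?_cons_of_neg (by simpa using h3),
                  List.find?_cons_of_pos (by simpa using h4)]
              rfl
            simp [PySem.Dict.modify, PySem.Dict.insert, PySem.Dict.getD, PySem.Dict.get?,
              PySem.Dict.contains, List.find?, ih, pvBucket, hc]
          · rw [if_neg h4]
            have hc : pvClassify (PySem.Str.lower (pvGetD fb "reason" "")) = none := by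
              simp only [pvClassify, pvRules]
              rw [List.find?_cons_of_neg (by simpa using h1),
                  List.find?_cons_of_neg (by simpa using h2),
                  List.find?_cons_of_neg (by simpa using h3),
                  List.find?_cons_of_neg (by simpa using h4)]
              rfl
            simp [ih, pvBucket, hc]

-- ===== VERDICT (by name: the statement is the Claim_ definition above) =====
theorem extract_negative_patterns_py_spec : Claim_equal_extract_negative_patterns_py := by
  intro nf _
  unfold Spec_extract_negative_patterns_py extract_negative_patterns_py
    extract_negative_patterns_py_alt
  have h0 : PySem.Dict.ofList
      ([("timing_issues", ([] : List String)), ("complexity_issues", []),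
        ("sensory_issues", []), ("cultural_mismatches", [])])
      = PySem.Dict.mk [("timing_issues", []), ("complexity_issues", []),
                       ("sensory_issues", []), ("cultural_mismatches", [])] := by decide
  rw [h0, pvMain]
  simp [pvRules, pvBucket]
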